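-- pv_equiv track=rewrite | github.com/dasaro/ABA-variants | WABA/benchmark/src/waba_bench/generator/derivation_chain_builder.py | validate_attack_chain_coverage
-- ===== SOURCE A (Python) =====
-- from typing import List, Tuple, Dict, Set, Optional
--
-- def validate_attack_chain_coverage(
--     derived_atoms: List[str],
--     rules: List[Tuple[str, str, List[str]]],
--     contraries: Dict[str, str]
-- ) -> Tuple[bool, Set[str]]:
--     """
--     Validate that all derived atoms participate in attack chains.
--
--     Args:
--         derived_atoms: List of derived atom names
--         rules: List of (rule_id, head, body) tuples
--         contraries: Dict of assumption -> contrary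
--
--     Returns:
--         (all_valid, set_of_useless_atoms)
--     """
--     contrary_set = set(contraries.values())
--
--     # Build derivation graph: atom -> {atoms it helps derive}
--     derives = {}
--     for _, head, body in rules:
--         for body_atom in body:
--             if body_atom not in derives:
--                 derives[body_atom] = set()
--             derives[body_atom].add(head)
--
--     # BFS to check if each derived atom leads to a contrary
--     useless_atoms = set()
--
--     for d_atom in derived_atoms:
--         visited = set()
--         queue = [d_atom]
--         found_contrary = False
--
--         while queue and not found_contrary:
--             current = queue.pop(0)
--             if current in visited:
--                 continue
--             visited.add(current)
--
--             # Check if current is a contrary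
--             if current in contrary_set:
--                 found_contrary = True
--                 break
--
--             # Explore what current derives
--             if current in derives:
--                 for next_atom in derives[current]:
--                     if next_atom not in visited:
--                         queue.append(next_atom)
--
--         if not found_contrary:
--             useless_atoms.add(d_atom)
--
--     all_valid = len(useless_atoms) == 0
--     return all_valid, useless_atoms
-- ===== SOURCE B (Python) =====
-- from typing import List, Tuple, Dict, Set
--
--
-- def validate_attack_chain_coverage(
--     derived_atoms: List[str],
--     rules: List[Tuple[str, str, List[str]]],
--     contraries: Dict[str, str]
-- ) -> Tuple[bool, Set[str]]:
--     # Backward saturation: compute once the set of all atoms that can reach a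
--     # contrary, instead of running a fresh forward BFS from every derived atom.
--     reach = set(contraries.values())
--     changed = True
--     while changed:
--         changed = False
--         for _, head, body in rules:
--             if head in reach:
--                 for b in body:
--                     if b not in reach:
--                         reach.add(b)
--                         changed = True
--     useless_atoms = {d for d in derived_atoms if d not in reach}
--     return len(useless_atoms) == 0, useless_atoms
-- ===== Notes on version B (the rewrite author's own statement) =====
-- stated objective: faster
-- what changed: Replaces the per-derived-atom forward BFS (with a derivation-graph dict, queue and visited set per atom) by one global backward saturation of the 'reaches a contrary' set over the rules, followed by a single membership filter over derived_atoms.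
import Mathlib
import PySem

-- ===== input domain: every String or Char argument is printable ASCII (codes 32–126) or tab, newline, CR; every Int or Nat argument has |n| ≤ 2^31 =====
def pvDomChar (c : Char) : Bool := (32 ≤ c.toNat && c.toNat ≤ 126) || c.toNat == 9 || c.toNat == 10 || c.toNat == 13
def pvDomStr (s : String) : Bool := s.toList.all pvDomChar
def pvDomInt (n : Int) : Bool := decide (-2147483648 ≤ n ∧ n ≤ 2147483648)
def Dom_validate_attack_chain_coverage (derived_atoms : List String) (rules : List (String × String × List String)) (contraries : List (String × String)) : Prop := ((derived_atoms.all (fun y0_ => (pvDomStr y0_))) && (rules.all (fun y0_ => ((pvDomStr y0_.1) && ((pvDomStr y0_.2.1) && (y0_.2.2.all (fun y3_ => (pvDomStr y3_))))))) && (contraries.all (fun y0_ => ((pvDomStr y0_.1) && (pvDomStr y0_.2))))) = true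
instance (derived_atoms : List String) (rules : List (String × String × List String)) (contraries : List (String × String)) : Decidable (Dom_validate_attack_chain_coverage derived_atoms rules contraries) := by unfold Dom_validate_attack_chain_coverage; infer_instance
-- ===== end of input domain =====

-- B replaces A's per-derived-atom forward BFS by one global backward saturation
-- of the "reaches a contrary" set over the rules, then a single membership filter.

-- ===== PORT A =====
-- the `derives` dict built by A: for each rule, for each body atom, ensure a key then add the head
def pvA_derives (rules : List (String × String × List String)) : PySem.Dict String (PySem.Set String) :=
  rules.foldl (fun d r =>
    r.2.2.foldl (fun d b =>
      let d1 := if d.contains b then d else d.insert b ([] : PySem.Set String)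
      d1.modify b [] (fun s => PySem.Set.add s r.2.1)) d) PySem.Dict.empty

-- A's inner `while queue and not found_contrary` loop (fuel is an upper bound on
-- the number of pops, proved sufficient below; Python's loop always terminates)
def pvA_bfs (derives : PySem.Dict String (PySem.Set String)) (contrary_set : PySem.Set String) :
    Nat → PySem.Set String → List String → Bool
  | 0, _, _ => false
  | fuel+1, visited, queue =>
    match queue with
    | [] => false
    | current :: rest =>
      if PySem.Set.contains visited current then
        pvA_bfs derives contrary_set fuel visited rest
      else
        let visited' := PySem.Set.add visited current
        if PySem.Set.contains contrary_set current then true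
        else
          match derives.get? current with
          | some s =>
              pvA_bfs derives contrary_set fuel visited'
                (rest ++ s.filter (fun x => !(PySem.Set.contains visited' x)))
          | none => pvA_bfs derives contrary_set fuel visited' rest

def validate_attack_chain_coverage (derived_atoms : List String) (rules : List (String × String × List String)) (contraries : List (String × String)) : Bool × List String :=
  let contrary_set : PySem.Set String := PySem.Set.ofList (PySem.Dict.values (PySem.Dict.ofList contraries))
  let derives := pvA_derives rules
  let fuel := (rules.length + 1) * (rules.length + 1) + 2
  let useless : PySem.Set String := derived_atoms.foldl
    (fun acc d => if pvA_bfs derives contrary_set fuel [] [d] then acc else PySem.Set.add acc d) []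
  (useless.length == 0, useless)

-- ===== PORT B =====
-- one `for _, head, body in rules` pass of B's saturation loop
def pvB_pass (rules : List (String × String × List String)) (reach : PySem.Set String) : PySem.Set String :=
  rules.foldl (fun reach r =>
    if PySem.Set.contains reach r.2.1 then
      r.2.2.foldl (fun reach b => PySem.Set.add reach b) reach
    else reach) reach

-- B's `while changed` loop (changed = False exactly when a pass adds nothing,
-- i.e. returns the same element list; fuel is proved sufficient below)
def pvB_loop (rules : List (String × String × List String)) :
    Nat → PySem.Set String → PySem.Set String
  | 0, reach => reach
  | fuel+1, reach =>
    let reach' := pvB_pass rules reach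
    if reach' = reach then reach else pvB_loop rules fuel reach'

def validate_attack_chain_coverage_alt (derived_atoms : List String) (rules : List (String × String × List String)) (contraries : List (String × String)) : Bool × List String :=
  let reach0 : PySem.Set String := PySem.Set.ofList (PySem.Dict.values (PySem.Dict.ofList contraries))
  let fuel := contraries.length + (rules.map (fun r => r.2.2.length)).sum + 1
  let reach := pvB_loop rules fuel reach0
  let useless : PySem.Set String :=
    PySem.Set.ofList (derived_atoms.filter (fun d => !(PySem.Set.contains reach d)))
  (useless.length == 0, useless)

-- ===== PRECONDITION & SPEC =====
def Spec_validate_attack_chain_coverage (derived_atoms : List String) (rules : List (String × String × List String)) (contraries : List (String × String)) (out : Bool × List String) : Prop := out = validate_attack_chain_coverage_alt derived_atoms rules contraries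
instance (derived_atoms : List String) (rules : List (String × String × List String)) (contraries : List (String × String)) (out : Bool × List String) : Decidable (Spec_validate_attack_chain_coverage derived_atoms rules contraries out) := by unfold Spec_validate_attack_chain_coverage; infer_instance

-- ===== CLAIM (what is proved, stated in full; the proofs are below) =====
def Claim_equal_validate_attack_chain_coverage : Prop := ∀ (derived_atoms : List String) (rules : List (String × String × List String)) (contraries : List (String × String)), Dom_validate_attack_chain_coverage derived_atoms rules contraries → Spec_validate_attack_chain_coverage derived_atoms rules contraries (validate_attack_chain_coverage derived_atoms rules contraries)

-- ===== LEMMAS AND PROOFS =====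

-- u derives v in one rule application (the edges of A's `derives` graph)
def pvEdge (rules : List (String × String × List String)) (u v : String) : Prop :=
  ∃ r ∈ rules, u ∈ r.2.2 ∧ v = r.2.1

-- v reaches some element of C along derivation edges
def pvReach (rules : List (String × String × List String)) (C : List String) (v : String) : Prop :=
  ∃ c, Relation.ReflTransGen (pvEdge rules) v c ∧ c ∈ C

theorem pvA_step_getD (d : PySem.Dict String (PySem.Set String)) (b head u : String) :
    ((if d.contains b then d else d.insert b ([] : PySem.Set String)).modify b []
      (fun s => PySem.Set.add s head)).getD u []
    = if u = b then PySem.Set.add (d.getD b []) head else d.getD u [] := by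
  by_cases hc : d.contains b = true
  · simp [hc, PySem.Dict.getD_modify]
  · simp only [hc, Bool.false_eq_true, if_false]
    rw [PySem.Dict.getD_modify, PySem.Dict.getD_insert]
    have : d.getD b [] = [] := PySem.Dict.getD_of_not_contains d [] (by simpa using hc)
    split_ifs with h <;> simp [h, this, PySem.Dict.getD_insert]

theorem pvA_inner_getD (body : List String) (head u x : String) :
    ∀ d : PySem.Dict String (PySem.Set String),
    (x ∈ (body.foldl (fun d b =>
      let d1 := if d.contains b then d else d.insert b ([] : PySem.Set String)
      d1.modify b [] (fun s => PySem.Set.add s head)) d).getD u []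
     ↔ x ∈ d.getD u [] ∨ (u ∈ body ∧ x = head)) := by
  induction body with
  | nil => simp
  | cons b body ih =>
    intro d
    simp only [List.foldl_cons, ih, pvA_step_getD]
    by_cases hub : u = b
    · subst hub
      simp only [if_true, PySem.Set.mem_add, List.mem_cons]
      tauto
    · simp only [if_neg hub, List.mem_cons]
      tauto

theorem pvA_derives_getD (rules : List (String × String × List String)) (u x : String) :
    x ∈ (pvA_derives rules).getD u [] ↔ pvEdge rules u x := by
  unfold pvA_derives pvEdge
  have main : ∀ (rs : List (String × String × List String)) (d : PySem.Dict String (PySem.Set String)),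
      (x ∈ (rs.foldl (fun d r =>
        r.2.2.foldl (fun d b =>
          let d1 := if d.contains b then d else d.insert b ([] : PySem.Set String)
          d1.modify b [] (fun s => PySem.Set.add s r.2.1)) d) d).getD u []
       ↔ x ∈ d.getD u [] ∨ ∃ r ∈ rs, u ∈ r.2.2 ∧ x = r.2.1) := by
    intro rs
    induction rs with
    | nil => simp
    | cons r rs ih =>
      intro d
      simp only [List.foldl_cons, ih, pvA_inner_getD]
      constructor
      · rintro ((h | ⟨hb, hx⟩) | ⟨r', hr', h1, h2⟩)
        · exact Or.inl h
        · exact Or.inr ⟨r, by simp, hb, hx⟩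
        · exact Or.inr ⟨r', by simp [hr'], h1, h2⟩
      · rintro (h | ⟨r', hr', h1, h2⟩)
        · exact Or.inl (Or.inl h)
        · rcases List.mem_cons.mp hr' with rfl | hr'
          · exact Or.inl (Or.inr ⟨h1, h2⟩)
          · exact Or.inr ⟨r', hr', h1, h2⟩
  rw [main]
  simp [PySem.Dict.getD_empty]

theorem pvA_derives_nodup (rules : List (String × String × List String)) (u : String) :
    ((pvA_derives rules).getD u []).Nodup := by
  unfold pvA_derives
  have inner : ∀ (body : List String) (head : String) (d : PySem.Dict String (PySem.Set String)),
      (∀ w, (d.getD w ([] : PySem.Set String)).Nodup) →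
      ∀ w, ((body.foldl (fun d b =>
        let d1 := if d.contains b then d else d.insert b ([] : PySem.Set String)
        d1.modify b [] (fun s => PySem.Set.add s head)) d).getD w []).Nodup := by
    intro body head
    induction body with
    | nil => intro d h w; simpa using h w
    | cons b body ih =>
      intro d h w
      refine ih _ (fun w' => ?_) w
      rw [pvA_step_getD]
      split_ifs with hw
      · exact PySem.Set.nodup_add _ _ (h b)
      · exact h w'
  have main : ∀ (rs : List (String × String × List String)) (d : PySem.Dict String (PySem.Set String)),
      (∀ w, (d.getD w ([] : PySem.Set String)).Nodup) →
      ∀ w, ((rs.foldl (fun d r =>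
        r.2.2.foldl (fun d b =>
          let d1 := if d.contains b then d else d.insert b ([] : PySem.Set String)
          d1.modify b [] (fun s => PySem.Set.add s r.2.1)) d) d).getD w []).Nodup := by
    intro rs
    induction rs with
    | nil => intro d h w; exact h w
    | cons r rs ih => intro d h w; exact ih _ (inner r.2.2 r.2.1 d h) w
  exact main rules PySem.Dict.empty (by simp [PySem.Dict.getD_empty]) u

theorem pvA_succ_len (rules : List (String × String × List String)) (u : String) :
    ((pvA_derives rules).getD u []).length ≤ rules.length := by
  have hnd := pvA_derives_nodup rules u
  have hsub : ((pvA_derives rules).getD u []).toFinset ⊆ (rules.map (fun r => r.2.1)).toFinset := by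
    intro x hx
    rw [List.mem_toFinset] at hx ⊢
    obtain ⟨r, hr, _, hx⟩ := (pvA_derives_getD rules u x).mp hx
    exact List.mem_map.mpr ⟨r, hr, hx.symm⟩
  calc ((pvA_derives rules).getD u []).length
      = ((pvA_derives rules).getD u []).toFinset.card := (List.toFinset_card_of_nodup hnd).symm
    _ ≤ (rules.map (fun r => r.2.1)).toFinset.card := Finset.card_le_card hsub
    _ ≤ (rules.map (fun r => r.2.1)).length := (rules.map (fun r => r.2.1)).toFinset_card_le
    _ = rules.length := List.length_map _

theorem pvEscape (rules : List (String × String × List String)) (C : List String)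
    (visited queue : List String)
    (h1 : ∀ v ∈ visited, v ∉ C)
    (h2 : ∀ v ∈ visited, ∀ x, pvEdge rules v x → x ∈ visited ∨ x ∈ queue)
    (v : String) (hv : v ∈ visited) (hr : pvReach rules C v) :
    ∃ w ∈ queue, w ∉ visited ∧ pvReach rules C w := by
  obtain ⟨c, hpath, hc⟩ := hr
  revert hv
  induction hpath using Relation.ReflTransGen.head_induction_on with
  | refl => intro hv; exact absurd hc (h1 _ hv)
  | head h' hrest ih =>
    rename_i a b
    intro ha
    by_cases hb : b ∈ visited
    · exact ih hb
    · rcases h2 a ha b h' with h | h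
      · exact absurd h hb
      · exact ⟨b, h, hb, c, hrest, hc⟩

theorem pvA_bfs_iff (rules : List (String × String × List String)) (C U : List String)
    (hU : ∀ r ∈ rules, r.2.1 ∈ U) :
    ∀ fuel (visited queue : List String),
    (∀ v ∈ visited, v ∉ C) →
    (∀ v ∈ visited, ∀ x, pvEdge rules v x → x ∈ visited ∨ x ∈ queue) →
    (∀ v ∈ queue, v ∈ U) →
    (rules.length + 1) * (U.toFinset \ visited.toFinset).card + queue.length + 1 ≤ fuel →
    (pvA_bfs (pvA_derives rules) C fuel visited queue = true ↔ ∃ v ∈ queue, pvReach rules C v) := by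
  intro fuel
  induction fuel with
  | zero => intro visited queue _ _ _ hb; omega
  | succ fuel ih =>
    intro visited queue h1 h2 hq hb
    match queue with
    | [] => simp [pvA_bfs]
    | current :: rest =>
      by_cases hcv : current ∈ visited
      · have hstep : pvA_bfs (pvA_derives rules) C (fuel+1) visited (current::rest)
            = pvA_bfs (pvA_derives rules) C fuel visited rest := by
          simp [pvA_bfs, hcv]
        have h2' : ∀ v ∈ visited, ∀ x, pvEdge rules v x → x ∈ visited ∨ x ∈ rest := by
          intro v hv x hx
          rcases h2 v hv x hx with h | h
          · exact Or.inl h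
          · rcases List.mem_cons.mp h with rfl | h
            · exact Or.inl hcv
            · exact Or.inr h
        have hb' : (rules.length + 1) * (U.toFinset \ visited.toFinset).card + rest.length + 1 ≤ fuel := by
          simp only [List.length_cons] at hb; omega
        rw [hstep, ih visited rest h1 h2' (fun v hv => hq v (List.mem_cons_of_mem _ hv)) hb']
        constructor
        · rintro ⟨v, hv, hr⟩; exact ⟨v, List.mem_cons_of_mem _ hv, hr⟩
        · rintro ⟨v, hv, hr⟩
          rcases List.mem_cons.mp hv with rfl | hv
          · obtain ⟨w, hwq, hwnv, hwr⟩ := pvEscape rules C visited (v::rest) h1 h2 v hcv hr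
            rcases List.mem_cons.mp hwq with rfl | hwq
            · exact absurd hcv hwnv
            · exact ⟨w, hwq, hwr⟩
          · exact ⟨v, hv, hr⟩
      · have hmemvis' : ∀ x, x ∈ PySem.Set.add visited current ↔ x ∈ visited ∨ x = current :=
          fun x => PySem.Set.mem_add _ _ _
        by_cases hcC : current ∈ C
        · have hstep : pvA_bfs (pvA_derives rules) C (fuel+1) visited (current::rest) = true := by
            simp [pvA_bfs, hcv, hcC]
          rw [hstep]
          simp only [true_iff]
          exact ⟨current, List.mem_cons_self, current, Relation.ReflTransGen.refl, hcC⟩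
        · have hstep : pvA_bfs (pvA_derives rules) C (fuel+1) visited (current::rest)
              = pvA_bfs (pvA_derives rules) C fuel (PySem.Set.add visited current)
                  (rest ++ ((pvA_derives rules).getD current []).filter
                    (fun x => !(PySem.Set.contains (PySem.Set.add visited current) x))) := by
            cases hget : (pvA_derives rules).get? current with
            | none => simp [pvA_bfs, hcv, hcC, PySem.Dict.getD, hget]
            | some s => simp [pvA_bfs, hcv, hcC, PySem.Dict.getD, hget]
          set visited' := PySem.Set.add visited current with hvis'
          set queue' := rest ++ ((pvA_derives rules).getD current []).filter
              (fun x => !(PySem.Set.contains visited' x)) with hq'def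
          have hmemq' : ∀ x, x ∈ queue' ↔ x ∈ rest ∨
              (x ∈ (pvA_derives rules).getD current [] ∧ x ∉ visited') := by
            intro x
            rw [hq'def, List.mem_append, List.mem_filter]
            constructor
            · rintro (h | ⟨h1x, h2x⟩)
              · exact Or.inl h
              · refine Or.inr ⟨h1x, ?_⟩
                intro hx
                rw [Bool.not_eq_eq_eq_not, Bool.not_true, Bool.eq_false_iff] at h2x
                exact h2x ((PySem.Set.contains_iff _ _).mpr hx)
            · rintro (h | ⟨h1x, h2x⟩)
              · exact Or.inl h
              · refine Or.inr ⟨h1x, ?_⟩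
                rw [Bool.not_eq_eq_eq_not, Bool.not_true, Bool.eq_false_iff]
                intro h; exact h2x ((PySem.Set.contains_iff _ _).mp h)
          have h1' : ∀ v ∈ visited', v ∉ C := by
            intro v hv
            rcases (hmemvis' v).mp hv with h | rfl
            · exact h1 v h
            · exact hcC
          have h2' : ∀ v ∈ visited', ∀ x, pvEdge rules v x → x ∈ visited' ∨ x ∈ queue' := by
            intro v hv x hx
            rcases (hmemvis' v).mp hv with h | rfl
            · rcases h2 v h x hx with h' | h'
              · exact Or.inl ((hmemvis' x).mpr (Or.inl h'))
              · rcases List.mem_cons.mp h' with rfl | h'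
                · exact Or.inl ((hmemvis' x).mpr (Or.inr rfl))
                · exact Or.inr ((hmemq' x).mpr (Or.inl h'))
            · have hxS : x ∈ (pvA_derives rules).getD v [] := (pvA_derives_getD rules v x).mpr hx
              by_cases hxv : x ∈ visited'
              · exact Or.inl hxv
              · exact Or.inr ((hmemq' x).mpr (Or.inr ⟨hxS, hxv⟩))
          have hqU' : ∀ v ∈ queue', v ∈ U := by
            intro v hv
            rcases (hmemq' v).mp hv with h | ⟨h, _⟩
            · exact hq v (List.mem_cons_of_mem _ h)
            · obtain ⟨r, hr, _, hv'⟩ := (pvA_derives_getD rules current v).mp h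
              exact hv' ▸ hU r hr
          have hb' : (rules.length + 1) * (U.toFinset \ visited'.toFinset).card
              + queue'.length + 1 ≤ fuel := by
            have hcurU : current ∈ U := hq current List.mem_cons_self
            have hmemsd : current ∈ U.toFinset \ visited.toFinset := by
              simp [Finset.mem_sdiff, List.mem_toFinset, hcurU, hcv]
            have hfin : U.toFinset \ List.toFinset visited'
                = (U.toFinset \ visited.toFinset).erase current := by
              show U.toFinset \ List.toFinset (PySem.Set.add visited current) = _
              rw [PySem.Set.add_of_not_mem hcv]
              ext a
              simp only [Finset.mem_sdiff, Finset.mem_erase, List.mem_toFinset, List.mem_append,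
                List.mem_singleton]
              tauto
            have hcard : (U.toFinset \ List.toFinset visited').card
                = (U.toFinset \ visited.toFinset).card - 1 := by
              rw [hfin, Finset.card_erase_of_mem hmemsd]
            have hpos : 1 ≤ (U.toFinset \ visited.toFinset).card :=
              Finset.card_pos.mpr ⟨current, hmemsd⟩
            have hqlen : queue'.length ≤ rest.length + rules.length := by
              rw [hq'def, List.length_append]
              have := List.length_filter_le (fun x => !(PySem.Set.contains visited' x))
                ((pvA_derives rules).getD current [])
              have := pvA_succ_len rules current
              omega
            have hmul : (rules.length+1) * 1 ≤ (rules.length+1) * (U.toFinset \ visited.toFinset).card :=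
              Nat.mul_le_mul_left _ hpos
            simp only [List.length_cons] at hb
            rw [hcard, Nat.mul_sub]
            omega
          rw [hstep, ih visited' queue' h1' h2' hqU' hb']
          constructor
          · rintro ⟨v, hv, hr⟩
            rcases (hmemq' v).mp hv with h | ⟨h, _⟩
            · exact ⟨v, List.mem_cons_of_mem _ h, hr⟩
            · obtain ⟨c, hp, hc⟩ := hr
              exact ⟨current, List.mem_cons_self,
                c, Relation.ReflTransGen.head ((pvA_derives_getD rules current v).mp h) hp, hc⟩
          · rintro ⟨v, hv, hr⟩
            rcases List.mem_cons.mp hv with rfl | hv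
            · obtain ⟨w, hwq, _, hwr⟩ := pvEscape rules C visited' queue' h1' h2' v
                ((hmemvis' v).mpr (Or.inr rfl)) hr
              exact ⟨w, hwq, hwr⟩
            · exact ⟨v, ((hmemq' v).mpr (Or.inl hv)), hr⟩

theorem pvA_bfs_start (rules : List (String × String × List String)) (C : List String) (s : String) :
    (pvA_bfs (pvA_derives rules) C ((rules.length + 1) * (rules.length + 1) + 2) [] [s] = true
      ↔ pvReach rules C s) := by
  have hU : ∀ r ∈ rules, r.2.1 ∈ s :: rules.map (fun r => r.2.1) := by
    intro r hr
    exact List.mem_cons_of_mem _ (List.mem_map.mpr ⟨r, hr, rfl⟩)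
  have hcard : ((s :: rules.map (fun r => r.2.1)).toFinset \ (([] : List String)).toFinset).card
      ≤ rules.length + 1 := by
    simp only [List.toFinset_nil, Finset.sdiff_empty]
    calc (s :: rules.map (fun r => r.2.1)).toFinset.card
        ≤ (s :: rules.map (fun r => r.2.1)).length := List.toFinset_card_le _
      _ = rules.length + 1 := by simp
  rw [pvA_bfs_iff rules C (s :: rules.map (fun r => r.2.1)) hU
      ((rules.length + 1) * (rules.length + 1) + 2) [] [s]
      (by simp) (by simp) (by intro v hv; simpa using Or.inl (List.mem_singleton.mp hv))
      (by
        have := Nat.mul_le_mul_left (rules.length + 1) hcard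
        simp only [List.length_singleton]
        omega)]
  simp

-- ===== B-side lemmas =====

theorem pvFoldl_prefix {α : Type} (g : PySem.Set String → α → PySem.Set String)
    (hg : ∀ s a, s <+: g s a) : ∀ (l : List α) (s : PySem.Set String), s <+: l.foldl g s := by
  intro l
  induction l with
  | nil => intro s; exact List.prefix_refl s
  | cons a l ih => intro s; exact (hg s a).trans (ih (g s a))

theorem pvAdd_prefix (s : PySem.Set String) (x : String) : s <+: PySem.Set.add s x := by
  rw [PySem.Set.add_eq_ite]
  split_ifs
  · exact List.prefix_refl s
  · exact List.prefix_append s [x]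

theorem pvB_step_prefix (r : String × String × List String) (s : PySem.Set String) :
    s <+: (if PySem.Set.contains s r.2.1 then
      r.2.2.foldl (fun reach b => PySem.Set.add reach b) s else s) := by
  split_ifs
  · exact pvFoldl_prefix _ pvAdd_prefix r.2.2 s
  · exact List.prefix_refl s

theorem pvB_pass_prefix (rules : List (String × String × List String)) (M : PySem.Set String) :
    M <+: pvB_pass rules M :=
  pvFoldl_prefix _ (fun s r => pvB_step_prefix r s) rules M

theorem pvB_pass_sub (rules : List (String × String × List String)) :
    ∀ (M : PySem.Set String) (v : String), v ∈ pvB_pass rules M →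
      v ∈ M ∨ ∃ r ∈ rules, v ∈ r.2.2 := by
  unfold pvB_pass
  induction rules with
  | nil => intro M v h; exact Or.inl h
  | cons r rs ih =>
    intro M v h
    rw [List.foldl_cons] at h
    rcases ih _ v h with h' | ⟨r', hr', hv⟩
    · by_cases hc : PySem.Set.contains M r.2.1 = true
      · rw [if_pos hc] at h'
        rcases (PySem.Set.mem_foldl_add r.2.2 (fun b => b) M v).mp h' with h'' | ⟨b, hb, rfl⟩
        · exact Or.inl h''
        · exact Or.inr ⟨r, List.mem_cons_self, hb⟩
      · rw [if_neg hc] at h'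
        exact Or.inl h'
    · exact Or.inr ⟨r', List.mem_cons_of_mem _ hr', hv⟩

theorem pvB_pass_reach (rules : List (String × String × List String)) (C : List String) :
    ∀ (rs : List (String × String × List String)), (∀ r ∈ rs, r ∈ rules) →
    ∀ (M : PySem.Set String), (∀ v ∈ M, pvReach rules C v) →
    ∀ v ∈ rs.foldl (fun reach r =>
      if PySem.Set.contains reach r.2.1 then
        r.2.2.foldl (fun reach b => PySem.Set.add reach b) reach
      else reach) M, pvReach rules C v := by
  intro rs
  induction rs with
  | nil => intro _ M hM v hv; exact hM v hv
  | cons r rs ih =>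
    intro hrs M hM
    rw [List.foldl_cons]
    refine ih (fun r' hr' => hrs r' (List.mem_cons_of_mem _ hr')) _ ?_
    intro v hv
    by_cases hc : PySem.Set.contains M r.2.1 = true
    · rw [if_pos hc] at hv
      rcases (PySem.Set.mem_foldl_add r.2.2 (fun b => b) M v).mp hv with h | ⟨b, hb, rfl⟩
      · exact hM v h
      · obtain ⟨c, hp, hcC⟩ := hM r.2.1 ((PySem.Set.contains_iff _ _).mp hc)
        exact ⟨c, Relation.ReflTransGen.head ⟨r, hrs r List.mem_cons_self, hb, rfl⟩ hp, hcC⟩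
    · rw [if_neg hc] at hv
      exact hM v hv

theorem pvB_pass_fix (rules : List (String × String × List String)) :
    ∀ (M : PySem.Set String), pvB_pass rules M = M →
      ∀ r ∈ rules, r.2.1 ∈ M → ∀ b ∈ r.2.2, b ∈ M := by
  unfold pvB_pass
  induction rules with
  | nil => intro M _ r hr; exact absurd hr (List.not_mem_nil)
  | cons r rs ih =>
    intro M hfix r' hr' hhead b hb
    rw [List.foldl_cons] at hfix
    have hstep := pvB_step_prefix r M
    have hrest := pvFoldl_prefix _ (fun s r => pvB_step_prefix r s) rs
      (if PySem.Set.contains M r.2.1 then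
        r.2.2.foldl (fun reach b => PySem.Set.add reach b) M else M)
    rw [hfix] at hrest
    have heq : (if PySem.Set.contains M r.2.1 then
        r.2.2.foldl (fun reach b => PySem.Set.add reach b) M else M) = M :=
      hrest.eq_of_length (Nat.le_antisymm hrest.length_le hstep.length_le)
    rcases List.mem_cons.mp hr' with rfl | hr'
    · have hc : PySem.Set.contains M r'.2.1 = true := (PySem.Set.contains_iff _ _).mpr hhead
      rw [if_pos hc] at heq
      rw [← heq]
      exact (PySem.Set.mem_foldl_add r'.2.2 (fun b => b) M b).mpr (Or.inr ⟨b, hb, rfl⟩)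
    · rw [heq] at hfix
      exact ih M hfix r' hr' hhead b hb

theorem pvB_pass_nodup (rules : List (String × String × List String)) :
    ∀ (M : PySem.Set String), M.Nodup → (pvB_pass rules M).Nodup := by
  unfold pvB_pass
  induction rules with
  | nil => intro M h; exact h
  | cons r rs ih =>
    intro M h
    rw [List.foldl_cons]
    refine ih _ ?_
    split_ifs
    · have : ∀ (body : List String) (s : PySem.Set String), s.Nodup →
          (body.foldl (fun reach b => PySem.Set.add reach b) s).Nodup := by
        intro body
        induction body with
        | nil => intro s hs; exact hs
        | cons b body ihb => intro s hs; exact ihb _ (PySem.Set.nodup_add _ _ hs)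
      exact this r.2.2 M h
    · exact h

theorem pvB_loop_prefix (rules : List (String × String × List String)) :
    ∀ (fuel : Nat) (M : PySem.Set String), M <+: pvB_loop rules fuel M := by
  intro fuel
  induction fuel with
  | zero => intro M; exact List.prefix_refl M
  | succ fuel ih =>
    intro M
    show M <+: (if pvB_pass rules M = M then M else pvB_loop rules fuel (pvB_pass rules M))
    split_ifs
    · exact List.prefix_refl M
    · exact (pvB_pass_prefix rules M).trans (ih (pvB_pass rules M))

theorem pvB_loop_reach (rules : List (String × String × List String)) (C : List String) :
    ∀ (fuel : Nat) (M : PySem.Set String), (∀ v ∈ M, pvReach rules C v) →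
      ∀ v ∈ pvB_loop rules fuel M, pvReach rules C v := by
  intro fuel
  induction fuel with
  | zero => intro M hM; exact hM
  | succ fuel ih =>
    intro M hM v hv
    rw [show pvB_loop rules (fuel+1) M
        = (if pvB_pass rules M = M then M else pvB_loop rules fuel (pvB_pass rules M)) from rfl] at hv
    split_ifs at hv
    · exact hM v hv
    · exact ih _ (pvB_pass_reach rules C rules (fun _ h => h) M hM) v hv

theorem pvB_loop_fix (rules : List (String × String × List String)) (univ : List String)
    (hbody : ∀ r ∈ rules, ∀ b ∈ r.2.2, b ∈ univ) :
    ∀ (fuel : Nat) (M : PySem.Set String), M.Nodup → (∀ v ∈ M, v ∈ univ) →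
      univ.toFinset.card + 1 ≤ fuel + M.length →
      pvB_pass rules (pvB_loop rules fuel M) = pvB_loop rules fuel M := by
  intro fuel
  induction fuel with
  | zero =>
    intro M hnd hsub hlen
    exfalso
    have h1 : M.length = M.toFinset.card := (List.toFinset_card_of_nodup hnd).symm
    have h2 : M.toFinset ⊆ univ.toFinset := by
      intro x hx
      rw [List.mem_toFinset] at hx ⊢
      exact hsub x hx
    have := Finset.card_le_card h2
    omega
  | succ fuel ih =>
    intro M hnd hsub hlen
    show pvB_pass rules (if pvB_pass rules M = M then M else pvB_loop rules fuel (pvB_pass rules M))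
      = (if pvB_pass rules M = M then M else pvB_loop rules fuel (pvB_pass rules M))
    split_ifs with hfix
    · rw [hfix]
    · have hpre := pvB_pass_prefix rules M
      have hlt : M.length < (pvB_pass rules M).length := by
        rcases Nat.lt_or_ge M.length (pvB_pass rules M).length with h | h
        · exact h
        · exact absurd (hpre.eq_of_length (Nat.le_antisymm hpre.length_le h)).symm hfix
      refine ih (pvB_pass rules M) (pvB_pass_nodup rules M hnd) ?_ (by omega)
      intro v hv
      rcases pvB_pass_sub rules M v hv with h | ⟨r, hr, hv'⟩
      · exact hsub v h
      · exact hbody r hr v hv'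

theorem pvB_loop_mem (rules : List (String × String × List String)) (C0 : List String)
    (hnd : C0.Nodup) (fuel : Nat)
    (hfuel : (rules.map (fun r => r.2.2.length)).sum + 1 ≤ fuel) :
    ∀ v, (v ∈ pvB_loop rules fuel C0 ↔ pvReach rules C0 v) := by
  have hbody : ∀ r ∈ rules, ∀ b ∈ r.2.2, b ∈ C0 ++ rules.flatMap (fun r => r.2.2) := by
    intro r hr b hb
    exact List.mem_append.mpr (Or.inr (List.mem_flatMap.mpr ⟨r, hr, hb⟩))
  have hlen : (C0 ++ rules.flatMap (fun r => r.2.2)).toFinset.card + 1 ≤ fuel + C0.length := by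
    have h1 := List.toFinset_card_le (C0 ++ rules.flatMap (fun r => r.2.2))
    rw [List.length_append, List.length_flatMap] at h1
    omega
  have hfix := pvB_loop_fix rules (C0 ++ rules.flatMap (fun r => r.2.2)) hbody fuel C0 hnd
    (fun v hv => List.mem_append.mpr (Or.inl hv)) hlen
  intro v
  constructor
  · intro hv
    exact pvB_loop_reach rules C0 fuel C0
      (fun w hw => ⟨w, Relation.ReflTransGen.refl, hw⟩) v hv
  · rintro ⟨c, hp, hc⟩
    have hC0 : c ∈ pvB_loop rules fuel C0 := (pvB_loop_prefix rules fuel C0).subset hc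
    clear hlen hbody
    induction hp using Relation.ReflTransGen.head_induction_on with
    | refl => exact hC0
    | head h' hrest ih =>
      obtain ⟨r, hr, hmem, rfl⟩ := h'
      exact pvB_pass_fix rules _ hfix r hr ih _ hmem

theorem pvFold_if_filter (p : String → Bool) :
    ∀ (l : List String) (acc : PySem.Set String),
      l.foldl (fun acc d => if p d then acc else PySem.Set.add acc d) acc
        = (l.filter (fun d => !p d)).foldl PySem.Set.add acc := by
  intro l
  induction l with
  | nil => intro acc; rfl
  | cons d l ih =>
    intro acc
    rw [List.foldl_cons, List.filter_cons]
    cases hd : p d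
    · simp only [Bool.not_false, if_true, List.foldl_cons]
      exact ih _
    · simp only [Bool.not_true, Bool.false_eq_true, if_false]
      exact ih _

theorem pv_main (derived_atoms : List String) (rules : List (String × String × List String)) (contraries : List (String × String)) :
    validate_attack_chain_coverage derived_atoms rules contraries
      = validate_attack_chain_coverage_alt derived_atoms rules contraries := by
  unfold validate_attack_chain_coverage validate_attack_chain_coverage_alt
  simp only []
  have hmem : ∀ d, pvA_bfs (pvA_derives rules)
      (PySem.Set.ofList (PySem.Dict.values (PySem.Dict.ofList contraries)))
      ((rules.length + 1) * (rules.length + 1) + 2) [] [d]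
      = PySem.Set.contains (pvB_loop rules
          (contraries.length + (rules.map (fun r => r.2.2.length)).sum + 1)
          (PySem.Set.ofList (PySem.Dict.values (PySem.Dict.ofList contraries)))) d := by
    intro d
    have h1 := pvA_bfs_start rules
      (PySem.Set.ofList (PySem.Dict.values (PySem.Dict.ofList contraries))) d
    have h2 := pvB_loop_mem rules
      (PySem.Set.ofList (PySem.Dict.values (PySem.Dict.ofList contraries)))
      (PySem.Set.nodup_ofList _)
      (contraries.length + (rules.map (fun r => r.2.2.length)).sum + 1)
      (by omega) d
    rw [Bool.eq_iff_iff, h1, PySem.Set.contains_iff, h2]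
  have huseless : derived_atoms.foldl
      (fun acc d => if pvA_bfs (pvA_derives rules)
        (PySem.Set.ofList (PySem.Dict.values (PySem.Dict.ofList contraries)))
        ((rules.length + 1) * (rules.length + 1) + 2) [] [d] then acc else PySem.Set.add acc d) []
      = PySem.Set.ofList (derived_atoms.filter (fun d => !(PySem.Set.contains (pvB_loop rules
          (contraries.length + (rules.map (fun r => r.2.2.length)).sum + 1)
          (PySem.Set.ofList (PySem.Dict.values (PySem.Dict.ofList contraries)))) d))) := by
    rw [pvFold_if_filter,
      List.filter_congr (fun d (_ : d ∈ derived_atoms) => by rw [hmem d] :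
        ∀ d ∈ derived_atoms, _ = (fun d => !(PySem.Set.contains (pvB_loop rules
          (contraries.length + (rules.map (fun r => r.2.2.length)).sum + 1)
          (PySem.Set.ofList (PySem.Dict.values (PySem.Dict.ofList contraries)))) d)) d)]
    exact (PySem.Set.ofList_eq_foldl _).symm
  rw [huseless]

-- ===== VERDICT (by name: the statement is the Claim_ definition above) =====
theorem validate_attack_chain_coverage_spec : Claim_equal_validate_attack_chain_coverage := by
  intro derived_atoms rules contraries _
  unfold Spec_validate_attack_chain_coverage
  exact pv_main derived_atoms rules contraries
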